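-- pv_equiv track=rewrite | github.com/manik3160/NeverDown | agents/agent_2_reasoner/patch_generator.py | normalize_diff
-- ===== SOURCE A (Python) =====
-- def normalize_diff(diff_content: str) -> str:
--     """Normalize diff format for consistency.
--
--     Args:
--         diff_content: Raw diff content
--
--     Returns:
--         Normalized diff content
--     """
--     lines = diff_content.split('\n')
--     normalized = []
--
--     for line in lines:
--         # Ensure proper line endings
--         line = line.rstrip()
--
--         # Skip empty lines at start
--         if not normalized and not line:
--             continue
--
--         normalized.append(line)
--
--     # Remove trailing empty lines
--     while normalized and not normalized[-1]:
--         normalized.pop()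
--
--     return '\n'.join(normalized) + '\n'
-- ===== SOURCE B (Python) =====
-- def normalize_diff(diff_content: str) -> str:
--     """Normalize diff format: rstrip every line, drop blank boundary lines."""
--     body = '\n'.join(line.rstrip() for line in diff_content.split('\n'))
--     return body.strip('\n') + '\n'
-- ===== Notes on version B (the rewrite author's own statement) =====
-- stated objective: simpler
-- what changed: Replaces the accumulator loop with its skip-leading guard and the trailing pop while-loop by a single join of the rstripped lines followed by stripping newline characters from both ends of the joined string, which removes the blank boundary lines in one step.
import Mathlib
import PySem

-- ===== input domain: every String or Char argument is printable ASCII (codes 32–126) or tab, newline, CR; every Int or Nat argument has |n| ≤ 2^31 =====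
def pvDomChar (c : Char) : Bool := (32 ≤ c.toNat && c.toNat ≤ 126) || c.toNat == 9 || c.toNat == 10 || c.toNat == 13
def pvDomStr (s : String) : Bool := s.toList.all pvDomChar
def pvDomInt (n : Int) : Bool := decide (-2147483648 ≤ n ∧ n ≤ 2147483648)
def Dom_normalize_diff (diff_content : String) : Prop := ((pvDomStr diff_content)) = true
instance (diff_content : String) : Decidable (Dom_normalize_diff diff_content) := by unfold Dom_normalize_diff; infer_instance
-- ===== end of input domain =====

-- B replaces A's accumulator loop (skip-leading guard) and trailing pop while-loop
-- by join-then-strip('\n') on the whole string: simpler, same O(n) cost.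


-- ===== PORT A =====
-- 'while normalized and not normalized[-1]: normalized.pop()'
def pvPopA (l : List (List Char)) : List (List Char) :=
  if h : l = [] then l
  else
    match PySem.List.pyGet? l (-1) with
    | some last => if last = [] then pvPopA l.dropLast else l
    | none => l
termination_by l.length
decreasing_by
  simp only [List.length_dropLast]
  have : l.length ≠ 0 := fun hz => h (List.eq_nil_of_length_eq_zero hz)
  omega

def normalize_diff (diff_content : String) : String :=
  let lines := PySem.Chars.splitOn diff_content.toList ['\n']
  let normalized := lines.foldl (fun normalized line =>
    let line := PySem.Chars.rstrip line
    if normalized = [] ∧ line = [] then normalized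
    else normalized ++ [line]) []
  let normalized := pvPopA normalized
  String.ofList (PySem.Chars.join ['\n'] normalized ++ ['\n'])

-- ===== PORT B =====
def normalize_diff_alt (diff_content : String) : String :=
  let body := PySem.Chars.join ['\n']
    ((PySem.Chars.splitOn diff_content.toList ['\n']).map PySem.Chars.rstrip)
  String.ofList (PySem.Chars.stripChars body ['\n'] ++ ['\n'])

-- ===== PRECONDITION & SPEC =====
def Spec_normalize_diff (diff_content : String) (out : String) : Prop := out = normalize_diff_alt diff_content
instance (diff_content : String) (out : String) : Decidable (Spec_normalize_diff diff_content out) := by unfold Spec_normalize_diff; infer_instance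

-- ===== CLAIM (what is proved, stated in full; the proofs are below) =====
def Claim_equal_normalize_diff : Prop := ∀ (diff_content : String), Dom_normalize_diff diff_content → Spec_normalize_diff diff_content (normalize_diff diff_content)

-- ===== LEMMAS AND PROOFS =====

-- pieces produced by splitOn ['\n'] never contain '\n'
theorem pv_go_no_nl (fuel : Nat) :
    ∀ (l cur : List Char) (acc : List (List Char)),
      l.length ≤ fuel → ('\n' ∉ cur) → (∀ p ∈ acc, ('\n':Char) ∉ p) →
      ∀ p ∈ PySem.Chars.splitOn.go ['\n'] fuel l cur acc, ('\n':Char) ∉ p := by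
  induction fuel with
  | zero =>
    intro l cur acc hl hc ha p hp
    have : l = [] := List.eq_nil_of_length_eq_zero (Nat.le_zero.mp hl)
    subst this
    rw [PySem.Chars.splitOn.go.eq_def] at hp
    simp only [List.mem_reverse, List.mem_cons, List.append_nil] at hp
    rcases hp with h | h
    · subst h; simpa using hc
    · exact ha p h
  | succ fuel ih =>
    intro l cur acc hl hc ha p hp
    match l with
    | [] =>
      rw [PySem.Chars.splitOn.go.eq_def] at hp
      simp only [List.mem_reverse, List.mem_cons] at hp
      rcases hp with h | h
      · subst h; simpa using hc
      · exact ha p h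
    | c :: rest =>
      rw [PySem.Chars.splitOn.go.eq_def] at hp
      simp only at hp
      by_cases hpre : List.isPrefixOf ['\n'] (c :: rest) = true
      · rw [if_pos hpre] at hp
        refine ih _ [] _ (by simpa using Nat.le_of_succ_le_succ (by simpa using hl)) (by simp) ?_ p hp
        intro q hq
        rcases List.mem_cons.mp hq with h | h
        · subst h; simpa using hc
        · exact ha q h
      · rw [if_neg hpre] at hp
        have hcne : c ≠ '\n' := by
          intro h; subst h
          simp [List.isPrefixOf] at hpre
        refine ih rest (c :: cur) acc (by simpa using hl) ?_ ha p hp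
        intro h
        rcases List.mem_cons.mp h with h | h
        · exact hcne h.symm
        · exact hc h

theorem pv_splitOn_no_nl (s : List Char) :
    ∀ p ∈ PySem.Chars.splitOn s ['\n'], ('\n':Char) ∉ p := by
  intro p hp
  exact pv_go_no_nl (s.length + 1) s [] [] (by omega) (by simp) (by simp) p hp

theorem pv_rstrip_no_nl (p : List Char) (h : ('\n':Char) ∉ p) :
    ('\n':Char) ∉ PySem.Chars.rstrip p := by
  intro hmem
  apply h
  simp only [PySem.Chars.rstrip, List.mem_reverse] at hmem
  exact List.mem_reverse.mp ((List.dropWhile_sublist _).mem hmem)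

-- A's foldl accumulates everything once nonempty
theorem pv_foldl_ne (ms : List (List Char)) (acc : List (List Char)) (h : acc ≠ []) :
    ms.foldl (fun a line => if a = [] ∧ line = [] then a else a ++ [line]) acc = acc ++ ms := by
  induction ms generalizing acc with
  | nil => simp
  | cons m rest ih =>
    simp only [List.foldl_cons]
    rw [if_neg (by tauto)]
    rw [ih _ (by simp)]
    simp

-- A's foldl from [] drops the leading empty lines
theorem pv_foldl_dropWhile (ms : List (List Char)) :
    ms.foldl (fun a line => if a = [] ∧ line = [] then a else a ++ [line]) [] =
      ms.dropWhile (fun l => l.isEmpty) := by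
  induction ms with
  | nil => simp
  | cons m rest ih =>
    by_cases hm : m = []
    · subst hm
      simpa [List.dropWhile_cons] using ih
    · simp only [List.foldl_cons, List.dropWhile_cons]
      rw [if_neg (by tauto)]
      rw [pv_foldl_ne _ _ (by simp)]
      simp [List.isEmpty_iff, hm]

theorem pv_pyGet_neg_one (l : List (List Char)) (x : List Char) :
    PySem.List.pyGet? (l ++ [x]) (-1) = some x := by
  simp [PySem.List.pyGet?, PySem.List.pyIdx?]

-- A's pop loop drops the trailing empty lines
theorem pv_popA_eq (l : List (List Char)) :
    pvPopA l = (l.reverse.dropWhile (fun x => x.isEmpty)).reverse := by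
  induction l using List.reverseRecOn with
  | nil => simp [pvPopA]
  | append_singleton xs x ih =>
    rw [pvPopA]
    rw [dif_neg (by simp)]
    rw [pv_pyGet_neg_one]
    simp only [List.reverse_append, List.reverse_cons, List.reverse_nil, List.nil_append,
      List.dropWhile_cons]
    by_cases hx : x = []
    · subst hx
      simp only [List.dropLast_append_cons]
      simpa using ih
    · rw [if_neg hx]
      simp [List.isEmpty_iff, hx]

-- join over a snoc
theorem pv_join_snoc (ms : List (List Char)) (b : List Char) :
    PySem.Chars.join ['\n'] (ms ++ [b]) =
      (if ms = [] then b else PySem.Chars.join ['\n'] ms ++ '\n' :: b) := by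
  induction ms with
  | nil => simp [PySem.Chars.join_singleton]
  | cons m rest ih =>
    match rest with
    | [] =>
      simp [PySem.Chars.join_cons_cons, PySem.Chars.join_singleton]
    | r :: rs =>
      rw [if_neg (by simp)]
      have h1 : (m :: r :: rs) ++ [b] = m :: r :: (rs ++ [b]) := by simp
      rw [h1, PySem.Chars.join_cons_cons]
      have h2 : r :: (rs ++ [b]) = (r :: rs) ++ [b] := by simp
      rw [h2, ih, if_neg (by simp), PySem.Chars.join_cons_cons]
      simp

-- reverse of a join
theorem pv_join_reverse (ms : List (List Char)) :
    (PySem.Chars.join ['\n'] ms).reverse =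
      PySem.Chars.join ['\n'] (ms.reverse.map List.reverse) := by
  induction ms with
  | nil => simp [PySem.Chars.join_nil]
  | cons m rest ih =>
    match rest with
    | [] => simp [PySem.Chars.join_singleton]
    | r :: rs =>
      rw [PySem.Chars.join_cons_cons]
      have h1 : (m :: r :: rs).reverse.map List.reverse =
          ((r :: rs).reverse.map List.reverse) ++ [m.reverse] := by simp
      rw [h1, pv_join_snoc, if_neg (by simp), ← ih]
      simp

-- dropping leading '\n's of a join = dropping leading empty pieces
theorem pv_dropWhile_join (ms : List (List Char)) (h : ∀ p ∈ ms, ('\n':Char) ∉ p) :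
    (PySem.Chars.join ['\n'] ms).dropWhile (fun c => c == '\n') =
      PySem.Chars.join ['\n'] (ms.dropWhile (fun l => l.isEmpty)) := by
  induction ms with
  | nil => simp [PySem.Chars.join_nil]
  | cons m rest ih =>
    match m, rest with
    | [], [] => simp [PySem.Chars.join_singleton, PySem.Chars.join_nil]
    | [], r :: rs =>
      rw [PySem.Chars.join_cons_cons]
      simp only [List.nil_append, List.singleton_append, List.dropWhile_cons]
      have : (('\n':Char) == '\n') = true := by decide
      rw [this]
      simp only [if_true]
      rw [ih (fun p hp => h p (List.mem_cons_of_mem _ hp))]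
      simp [List.dropWhile_cons]
    | c :: cs, [] =>
      have hc : c ≠ '\n' := fun hc => h (c :: cs) (by simp) (by rw [hc]; simp)
      simp [PySem.Chars.join_singleton, List.dropWhile_cons, hc]
    | c :: cs, r :: rs =>
      have hc : c ≠ '\n' := fun hc => h (c :: cs) (by simp) (by rw [hc]; simp)
      rw [PySem.Chars.join_cons_cons]
      simp only [List.cons_append, List.append_assoc, List.singleton_append, List.dropWhile_cons,
        beq_iff_eq, hc, if_false]
      rw [show ((c :: cs).isEmpty = false) from rfl]
      simp only [Bool.false_eq_true, if_false]
      rw [PySem.Chars.join_cons_cons]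
      simp

-- the central identity: trim the list of lines = strip '\n' from the joined string
theorem pv_main (ms : List (List Char)) (h : ∀ p ∈ ms, ('\n':Char) ∉ p) :
    PySem.Chars.join ['\n']
        (((ms.dropWhile (fun l => l.isEmpty)).reverse.dropWhile (fun x => x.isEmpty)).reverse) =
      PySem.Chars.stripChars (PySem.Chars.join ['\n'] ms) ['\n'] := by
  have hp : (fun c => List.contains ['\n'] c) = (fun c : Char => c == '\n') := by
    funext c; simp only [List.contains_cons, List.contains_nil, Bool.or_false]
  set L := ms.dropWhile (fun l => l.isEmpty) with hLdef
  have hL : ∀ p ∈ L, ('\n':Char) ∉ p := fun p hp' =>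
    h p ((List.dropWhile_sublist _).mem hp')
  have hLr : ∀ p ∈ L.reverse.map List.reverse, ('\n':Char) ∉ p := by
    intro p hp' hmem
    rcases List.mem_map.mp hp' with ⟨q, hq, rfl⟩
    exact hL q (List.mem_reverse.mp hq) (List.mem_reverse.mp hmem)
  rw [PySem.Chars.stripChars]
  simp only [hp]
  rw [pv_dropWhile_join ms h, pv_join_reverse, pv_dropWhile_join _ hLr, pv_join_reverse]
  congr 1
  rw [List.dropWhile_map]
  have hco : ((fun l : List Char => l.isEmpty) ∘ List.reverse) = (fun l : List Char => l.isEmpty) := by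
    funext l; simp
  rw [hco]
  simp [List.map_map, Function.comp_def]

-- ===== VERDICT (by name: the statement is the Claim_ definition above) =====
theorem normalize_diff_spec : Claim_equal_normalize_diff := by
  intro s _
  unfold Spec_normalize_diff normalize_diff normalize_diff_alt
  simp only
  set ms := (PySem.Chars.splitOn s.toList ['\n']).map PySem.Chars.rstrip with hms
  have hnl : ∀ p ∈ ms, ('\n':Char) ∉ p := by
    intro p hp
    rcases List.mem_map.mp hp with ⟨q, hq, rfl⟩
    exact pv_rstrip_no_nl q (pv_splitOn_no_nl s.toList q hq)
  have hfold :
      (PySem.Chars.splitOn s.toList ['\n']).foldl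
          (fun normalized line =>
            if normalized = [] ∧ PySem.Chars.rstrip line = [] then normalized
            else normalized ++ [PySem.Chars.rstrip line]) [] =
        ms.foldl (fun a line => if a = [] ∧ line = [] then a else a ++ [line]) [] := by
    rw [hms, List.foldl_map]
  rw [hfold, pv_foldl_dropWhile, pv_popA_eq, pv_main ms hnl]
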